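-- pv_equiv track=rewrite | github.com/Amrit-Code/Big-Data | code/PartD/Scam/reOrder.py | reducer1
-- ===== SOURCE A (Python) =====
-- def reducer1(word, values):
--     sorted_values = sorted(values, key = lambda tup:tup[0])
--     count = 1
--     binNo = 1
--     for value in sorted_values:
--         yield((binNo,value[1].strip("\n")),1)
--         count += 1
--         if count > 195:
--             count = 1
--             binNo += 1
-- ===== SOURCE B (Python) =====
-- def reducer1(word, values):
--     def chunks(xs):
--         while xs:
--             yield xs[:195]
--             xs = xs[195:]
--     sorted_values = sorted(values, key=lambda tup: tup[0])
--     for binNo, chunk in enumerate(chunks(sorted_values), 1):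
--         for value in chunk:
--             yield ((binNo, value[1].strip("\n")), 1)
-- ===== Notes on version B (the rewrite author's own statement) =====
-- stated objective: alternative
-- what changed: Replaces A's per-item count/binNo counter state machine with a two-stage pipeline: slice the sorted list into 195-element chunks, then emit each chunk's items tagged with its chunk number.
import Mathlib
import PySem

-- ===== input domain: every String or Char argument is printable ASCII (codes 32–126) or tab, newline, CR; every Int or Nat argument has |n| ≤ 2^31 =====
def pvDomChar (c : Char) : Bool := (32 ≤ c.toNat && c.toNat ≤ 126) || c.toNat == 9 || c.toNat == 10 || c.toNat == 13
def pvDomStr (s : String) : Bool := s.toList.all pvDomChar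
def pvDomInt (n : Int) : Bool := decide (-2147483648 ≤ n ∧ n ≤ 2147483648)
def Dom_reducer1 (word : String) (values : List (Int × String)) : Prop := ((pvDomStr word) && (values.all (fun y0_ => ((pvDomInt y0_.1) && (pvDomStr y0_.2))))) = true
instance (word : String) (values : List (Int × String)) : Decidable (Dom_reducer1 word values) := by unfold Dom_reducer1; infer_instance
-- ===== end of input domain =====

-- B replaces A's per-item count/binNo counter state machine with a two-stage pipeline:
-- slice the sorted list into 195-element chunks, then emit each chunk tagged with its
-- chunk number (objective: alternative decomposition, same cost).

-- ===== PORT A =====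
-- the for-loop over sorted_values with mutable count/binNo state
def reducer1Loop : List (Int × String) → Int → Int → List ((Int × String) × Int)
  | [], _, _ => []
  | v :: vs, count, binNo =>
      ((binNo, PySem.Str.stripChars v.2 "\n"), 1) ::
        (if count + 1 > 195 then reducer1Loop vs 1 (binNo + 1)
         else reducer1Loop vs (count + 1) binNo)

def reducer1 (word : String) (values : List (Int × String)) : List ((Int × String) × Int) :=
  reducer1Loop (PySem.List.sorted values (fun tup => tup.1)) 1 1

-- ===== PORT B =====
-- Source B's `chunks` generator: while xs: yield xs[:195]; xs = xs[195:]
def reducer1Chunks : List (Int × String) → List (List (Int × String))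
  | [] => []
  | x :: xs =>
      PySem.List.slice (x :: xs) none (some 195) ::
        reducer1Chunks (PySem.List.slice (x :: xs) (some 195) none)
  termination_by xs => xs.length
  decreasing_by simp [PySem.List.slice_some_none, PySem.List.clampIdx]

def reducer1_alt (word : String) (values : List (Int × String)) : List ((Int × String) × Int) :=
  let sorted_values := PySem.List.sorted values (fun tup => tup.1)
  (PySem.List.enumerate (reducer1Chunks sorted_values) 1).flatMap
    (fun bc => bc.2.map (fun v => ((bc.1, PySem.Str.stripChars v.2 "\n"), 1)))

-- ===== PRECONDITION & SPEC =====
def Spec_reducer1 (word : String) (values : List (Int × String)) (out : List ((Int × String) × Int)) : Prop := out = reducer1_alt word values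
instance (word : String) (values : List (Int × String)) (out : List ((Int × String) × Int)) : Decidable (Spec_reducer1 word values out) := by unfold Spec_reducer1; infer_instance

-- ===== CLAIM (what is proved, stated in full; the proofs are below) =====
def Claim_equal_reducer1 : Prop := ∀ (word : String) (values : List (Int × String)), Dom_reducer1 word values → Spec_reducer1 word values (reducer1 word values)

-- ===== LEMMAS AND PROOFS =====

-- A's loop with remaining capacity k (count = 196 - k) emits the next k items in bin b,
-- then restarts with a fresh counter in bin b + 1.
theorem reducer1Loop_chunk (xs : List (Int × String)) :
    ∀ (k : Nat) (b : Int), 1 ≤ k → k ≤ 195 →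
      reducer1Loop xs (196 - (k : Int)) b
        = (xs.take k).map (fun v => ((b, PySem.Str.stripChars v.2 "\n"), 1))
            ++ reducer1Loop (xs.drop k) 1 (b + 1) := by
  induction xs with
  | nil => intro k b _ _; simp [reducer1Loop]
  | cons v vs ih =>
    intro k b hk1 hk
    rcases Nat.eq_or_lt_of_le hk1 with h1 | h2
    · -- k = 1 : counter overflows, bin advances
      have hk' : k = 1 := h1.symm
      subst hk'
      simp only [reducer1Loop]
      rw [if_pos (by norm_num)]
      simp
    · -- k ≥ 2 : counter increments, same bin
      have hcond : ¬ (196 - (k : Int) + 1 > 195) := by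
        have : (2 : Int) ≤ (k : Int) := by exact_mod_cast h2
        omega
      simp only [reducer1Loop]
      rw [if_neg hcond]
      have harith : 196 - (k : Int) + 1 = 196 - ((k - 1 : Nat) : Int) := by
        have : (1 : Int) ≤ (k : Int) := by exact_mod_cast hk1
        push_cast [Nat.cast_sub hk1]
        ring
      rw [harith, ih (k - 1) b (by omega) (by omega)]
      have htake : (v :: vs).take k = v :: vs.take (k - 1) := by
        rcases Nat.exists_eq_add_of_le hk1 with ⟨m, hm⟩
        subst hm; simp [Nat.add_comm]
      have hdrop : (v :: vs).drop k = vs.drop (k - 1) := by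
        rcases Nat.exists_eq_add_of_le hk1 with ⟨m, hm⟩
        subst hm; simp [Nat.add_comm]
      rw [htake, hdrop]
      simp

-- the main correspondence: A's loop from a fresh counter equals B's chunk pipeline
theorem reducer1Loop_eq_chunks (xs : List (Int × String)) :
    ∀ (b : Int),
      reducer1Loop xs 1 b
        = (PySem.List.enumerate (reducer1Chunks xs) b).flatMap
            (fun bc => bc.2.map (fun v => ((bc.1, PySem.Str.stripChars v.2 "\n"), 1))) := by
  induction xs using reducer1Chunks.induct with
  | case1 => intro b; simp [reducer1Loop, reducer1Chunks, PySem.List.enumerate_nil]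
  | case2 x xs ih =>
    intro b
    have hto : PySem.List.slice (x :: xs) none (some 195) = x :: List.take 194 xs := by
      rw [PySem.List.slice_to (x :: xs) (by norm_num : (0:Int) ≤ 195)]
      rw [show Int.toNat 195 = 194 + 1 from rfl, List.take_succ_cons]
    have hfrom : PySem.List.slice (x :: xs) (some 195) none = List.drop 194 xs := by
      rw [PySem.List.slice_from (x :: xs) (by norm_num : (0:Int) ≤ 195)]
      rw [show Int.toNat 195 = 194 + 1 from rfl, List.drop_succ_cons]
    have h := reducer1Loop_chunk (x :: xs) 195 b (by norm_num) (le_refl _)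
    norm_num at h
    rw [h]
    simp only [hfrom] at ih
    rw [reducer1Chunks, PySem.List.enumerate_cons, List.flatMap_cons, hto, hfrom, ← ih (b + 1)]
    simp [List.map_take]

-- ===== VERDICT (by name: the statement is the Claim_ definition above) =====
theorem reducer1_spec : Claim_equal_reducer1 := by
  intro word values _
  unfold Spec_reducer1 reducer1 reducer1_alt
  exact reducer1Loop_eq_chunks (PySem.List.sorted values (fun tup => tup.1)) 1
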